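-- pv_equiv track=rewrite | github.com/ariel66/ML | characters_appear_times.py | f
-- ===== SOURCE A (Python) =====
-- def f(n):
--     d1 = {}
--     res = []
--     m = ''.join(n)
--     for i in m:
--         if i not in d1:
--             d1[i] = 1
--         else:
--             d1[i] += 1
--     for i in d1:
--         if d1[i] == 3:
--             res.append(i)
--     return res
-- ===== SOURCE B (Python) =====
-- def f(n):
--     def go(m):
--         if not m:
--             return []
--         c = m[0]
--         rest = m.replace(c, '')
--         head = [c] if len(m) - len(rest) == 3 else []
--         return head + go(rest)
--     return go(''.join(n))
-- ===== Notes on version B (the rewrite author's own statement) =====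
-- stated objective: alternative
-- what changed: Replaces A's frequency-dict pass plus a second key loop by a recursive remove-and-recurse partition: take the first character, measure its multiplicity by the length drop of str.replace(c, ''), emit it if that drop is 3, and recurse on the string with that character removed.
import Mathlib
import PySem

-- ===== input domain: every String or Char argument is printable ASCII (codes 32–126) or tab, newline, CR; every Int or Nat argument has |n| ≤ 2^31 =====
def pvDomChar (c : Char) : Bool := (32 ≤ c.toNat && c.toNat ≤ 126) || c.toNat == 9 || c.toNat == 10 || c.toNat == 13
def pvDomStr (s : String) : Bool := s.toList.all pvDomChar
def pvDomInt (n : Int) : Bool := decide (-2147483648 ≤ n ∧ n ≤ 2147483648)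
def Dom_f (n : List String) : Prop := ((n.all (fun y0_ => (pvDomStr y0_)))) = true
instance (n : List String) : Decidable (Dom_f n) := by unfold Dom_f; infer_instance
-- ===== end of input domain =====

-- B replaces A's frequency-dict pass and second key loop by a recursive remove-and-recurse
-- partition: take the first character, count it by the length drop of str.replace(c, ''),
-- and recurse on the remainder (alternative decomposition, no counting structure at all).

-- ===== PORT A =====
def f (n : List String) : List String :=
  let m := PySem.Str.join "" n
  let d1 := m.toList.foldl
    (fun d i => if !(d.contains i) then d.insert i (1 : Int) else d.modify i 0 (· + 1))
    PySem.Dict.empty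
  d1.keys.foldl (fun res i => if d1.getD i 0 == 3 then res ++ [String.ofList [i]] else res) []

-- ===== PORT B =====
-- go is ported over the string's character list; m.replace(c, '') with a single-character
-- old and empty new removes exactly every occurrence of c, which is List.filter (· ≠ c): exact.
def f_go (m : List Char) : List String :=
  match m with
  | [] => []
  | c :: t =>
    let rest := (c :: t).filter (fun x => x ≠ c)
    let head := if ((c :: t).length : Int) - (rest.length : Int) = 3 then [String.ofList [c]] else []
    head ++ f_go rest
  termination_by m.length
  decreasing_by
    simp only [List.filter_cons, decide_not, ne_eq, List.length_cons]
    exact Nat.lt_succ_of_le (List.length_filter_le _ _)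

def f_alt (n : List String) : List String :=
  f_go (PySem.Str.join "" n).toList

-- ===== PRECONDITION & SPEC =====
def Spec_f (n : List String) (out : List String) : Prop := out = f_alt n
instance (n : List String) (out : List String) : Decidable (Spec_f n out) := by unfold Spec_f; infer_instance

-- ===== CLAIM (what is proved, stated in full; the proofs are below) =====
def Claim_equal_f : Prop := ∀ (n : List String), Dom_f n → Spec_f n (f n)

-- ===== LEMMAS AND PROOFS =====

-- A's counting loop is PySem.Dict.counter
theorem loop_eq_counter (cs : List Char) :
    cs.foldl (fun d i => if !(d.contains i) then d.insert i (1 : Int) else d.modify i 0 (· + 1))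
      PySem.Dict.empty = PySem.Dict.counter cs := by
  rw [PySem.Dict.counter_eq_foldl]
  apply PySem.List.foldl_congr_mem
  intro d i _
  by_cases h : d.contains i = true
  · simp [h]
  · simp only [Bool.not_eq_true] at h
    have hg : d.getD i 0 = 0 := by
      simp [PySem.Dict.getD, (PySem.Dict.get?_eq_none_iff_contains d i).2 h]
    simp [h, PySem.Dict.modify, hg]

-- first-occurrence dedup, written as a structural recursion with a 'seen' accumulator
def dedupAux (t : List Char) (seen : List Char) : List Char :=
  match t with
  | [] => []
  | x :: t => if x ∈ seen then dedupAux t seen else x :: dedupAux t (x :: seen)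

theorem dedupAux_congr (t : List Char) : ∀ (s1 s2 : List Char),
    (∀ y, y ∈ s1 ↔ y ∈ s2) → dedupAux t s1 = dedupAux t s2 := by
  induction t with
  | nil => intro _ _ _; rfl
  | cons x t ih =>
    intro s1 s2 h
    simp only [dedupAux]
    by_cases hx : x ∈ s1
    · rw [if_pos hx, if_pos ((h x).1 hx), ih _ _ h]
    · rw [if_neg hx, if_neg (fun hx2 => hx ((h x).2 hx2))]
      refine congrArg _ (ih _ _ ?_)
      intro y; simp [h y]

theorem foldl_add_eq_dedupAux (t : List Char) : ∀ (acc : List Char),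
    t.foldl PySem.Set.add acc = acc ++ dedupAux t acc := by
  induction t with
  | nil => intro acc; simp [dedupAux]
  | cons x t ih =>
    intro acc
    simp only [List.foldl_cons, dedupAux, PySem.Set.add]
    by_cases hx : x ∈ acc
    · simp [hx, ih]
    · rw [if_neg (by simpa using hx), if_neg hx, ih]
      rw [dedupAux_congr t (acc ++ [x]) (x :: acc) (by intro y; simp; tauto)]
      simp

theorem dedup_eq_dedupAux (cs : List Char) : PySem.List.dedup cs = dedupAux cs [] := by
  simp [PySem.List.dedup, PySem.Set.ofList, PySem.Set.empty, foldl_add_eq_dedupAux]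

theorem dedupAux_filter (t : List Char) : ∀ (seen : List Char) (c : Char),
    dedupAux t (c :: seen) = dedupAux (t.filter (fun x => x ≠ c)) seen := by
  induction t with
  | nil => intro _ _; rfl
  | cons x t ih =>
    intro seen c
    by_cases hxc : x = c
    · subst hxc
      simp [dedupAux, ih]
    · simp only [List.filter_cons, ne_eq, hxc, not_false_eq_true, decide_true, if_true]
      by_cases hx : x ∈ seen
      · simp [dedupAux, hx, hxc, ih]
      · have hx2 : ¬ x ∈ c :: seen := by simp [hxc, hx]
        simp only [dedupAux, if_neg hx2, if_neg hx]
        refine congrArg _ ?_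
        rw [dedupAux_congr t (x :: c :: seen) (c :: x :: seen) (by intro y; simp; tauto), ih]

theorem dedup_cons (c : Char) (t : List Char) :
    PySem.List.dedup (c :: t) = c :: PySem.List.dedup (t.filter (fun x => x ≠ c)) := by
  rw [dedup_eq_dedupAux, dedup_eq_dedupAux]
  simp [dedupAux, dedupAux_filter]

theorem count_filter_ne (t : List Char) (c d : Char) (h : d ≠ c) :
    (t.filter (fun x => x ≠ c)).count d = t.count d := by
  induction t with
  | nil => rfl
  | cons x t ih =>
    rw [List.filter_cons]
    by_cases hx : x = c
    · subst hx
      simp only [ne_eq, not_true_eq_false, decide_false, Bool.false_eq_true, if_false, ih,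
        List.count_cons, beq_iff_eq, if_neg (fun e : x = d => h e.symm), Nat.add_zero]
    · simp only [ne_eq, hx, not_false_eq_true, decide_true, if_true, List.count_cons, ih]

theorem length_filter_add_count (c : Char) (l : List Char) :
    l.length = (l.filter (fun x => x ≠ c)).length + l.count c := by
  induction l with
  | nil => rfl
  | cons x t ih =>
    by_cases hx : x = c
    · subst hx
      simp only [List.filter_cons, List.count_cons, List.length_cons] at ih ⊢
      simp only [ne_eq] at ih ⊢
      simp at ih ⊢
      omega
    · simp only [List.filter_cons, List.count_cons, List.length_cons] at ih ⊢
      simp only [ne_eq] at ih ⊢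
      simp [hx] at ih ⊢
      omega

-- the characterisation both ports reduce to
theorem f_go_spec (m : List Char) :
    f_go m = ((PySem.List.dedup m).filter (fun c => m.count c == 3)).map
      (fun c => String.ofList [c]) := by
  induction hn : m.length using Nat.strong_induction_on generalizing m with
  | _ n ih =>
    match m with
    | [] => simp [f_go, PySem.List.dedup, PySem.Set.ofList, PySem.Set.empty]
    | c :: t =>
      have hfc : (c :: t).filter (fun x => x ≠ c) = t.filter (fun x => x ≠ c) := by
        simp
      have hlen : (t.filter (fun x => x ≠ c)).length < n := by
        subst hn
        exact Nat.lt_succ_of_le (List.length_filter_le _ _)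
      have hcount : (c :: t).length - (t.filter (fun x => x ≠ c)).length = (c :: t).count c := by
        have h1 := length_filter_add_count c (c :: t)
        rw [hfc] at h1
        omega
      rw [f_go, hfc]
      rw [ih _ (hn ▸ hlen) _ rfl]
      rw [dedup_cons]
      have hc3 : (((c :: t).length : Int) - ((t.filter (fun x => x ≠ c)).length : Int) = 3)
          ↔ ((c :: t).count c == 3) = true := by
        have hle : (t.filter (fun x => x ≠ c)).length ≤ (c :: t).length :=
          le_trans (List.length_filter_le _ _) (Nat.le_succ _)
        simp only [beq_iff_eq]
        omega
      simp only [List.filter_cons]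
      by_cases h3 : ((c :: t).count c == 3) = true
      · rw [if_pos (hc3.2 h3), h3]
        simp only [if_true, List.map_cons, List.cons_append, List.nil_append]
        refine congrArg _ (congrArg _ (List.filter_congr ?_))
        intro d hd
        have hdc : d ≠ c := by
          have := (PySem.List.mem_dedup _ _).1 hd
          simp at this
          exact this.2
        rw [count_filter_ne _ _ _ hdc, List.count_cons]
        simp [Ne.symm hdc]
      · rw [if_neg (fun h => h3 (hc3.1 h)), if_neg h3]
        simp only [List.nil_append]
        refine congrArg _ (List.filter_congr ?_)
        intro d hd
        have hdc : d ≠ c := by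
          have := (PySem.List.mem_dedup _ _).1 hd
          simp at this
          exact this.2
        rw [count_filter_ne _ _ _ hdc, List.count_cons]
        simp [Ne.symm hdc]

-- ===== VERDICT (by name: the statement is the Claim_ definition above) =====
theorem f_spec : Claim_equal_f := by
  intro n _
  unfold Spec_f f f_alt
  rw [f_go_spec]
  simp only [loop_eq_counter, PySem.Dict.keys_counter, ← PySem.List.dedup_eq_ofList,
    PySem.List.foldl_append_if, List.nil_append, PySem.Dict.getD_counter]
  congr 1
  apply List.filter_congr
  intro c _
  rw [Bool.eq_iff_iff]
  simp only [beq_iff_eq]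
  omega
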